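-- pv_equiv track=rewrite | github.com/bksy-lcy/srt_panoramic | net/chunk/panoramic_env.py | int_to_tile_seting
-- ===== SOURCE A (Python) =====
-- tile_size_set = ['WxH']
--
-- BITRATE_LEVELS = 1
--
-- def int_to_tile_seting(x, tile_cnt):
--     tile_seting = [(0,0) for tile_id in range(tile_cnt)]
--     base = len(tile_size_set) * BITRATE_LEVELS
--     for tile_id in range(tile_cnt-1, -1, -1):
--         y = x % base
--         x = x // base
--         tile_seting[tile_id] = (y//BITRATE_LEVELS, y%BITRATE_LEVELS)
--     return tile_seting
-- ===== SOURCE B (Python) =====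
-- def int_to_tile_seting(x, tile_cnt):
--     # base = len(tile_size_set) * BITRATE_LEVELS == 1, so every digit is 0:
--     # each tile setting is (0, 0) regardless of x.
--     return [(0, 0)] * tile_cnt
-- ===== Notes on version B (the rewrite author's own statement) =====
-- stated objective: simpler
-- what changed: Since base = len(tile_size_set)*BITRATE_LEVELS equals 1, every extracted digit is 0, so B replaces A's divmod loop with the closed-form constant list [(0,0)]*tile_cnt.
import Mathlib
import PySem

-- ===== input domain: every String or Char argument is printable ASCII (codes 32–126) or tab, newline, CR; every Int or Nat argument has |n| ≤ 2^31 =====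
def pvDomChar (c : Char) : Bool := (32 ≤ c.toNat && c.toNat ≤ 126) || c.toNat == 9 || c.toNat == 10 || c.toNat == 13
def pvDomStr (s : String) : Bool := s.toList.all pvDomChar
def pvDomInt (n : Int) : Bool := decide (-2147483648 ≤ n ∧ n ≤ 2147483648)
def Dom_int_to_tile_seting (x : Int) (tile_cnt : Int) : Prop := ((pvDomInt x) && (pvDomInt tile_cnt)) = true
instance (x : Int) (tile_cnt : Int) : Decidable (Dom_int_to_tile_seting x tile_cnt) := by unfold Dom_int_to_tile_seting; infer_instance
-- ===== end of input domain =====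

-- B replaces A's base-conversion loop by the constant list [(0,0)]*tile_cnt: exact because
-- base = len(tile_size_set)*BITRATE_LEVELS = 1 in this module, so every digit A extracts is 0.

-- ===== PORT A =====
def pvTileSizeSet : List String := ["WxH"]
def pvBitrateLevels : Int := 1

-- loop body of A: state is (tile_seting, x)
def pvStepA (base : Int) (st : List (Int × Int) × Int) (tile_id : Int) : List (Int × Int) × Int :=
  let y := PySem.Int.mod st.2 base
  let x' := PySem.Int.floordiv st.2 base
  (PySem.List.pySetD st.1 tile_id (PySem.Int.floordiv y pvBitrateLevels, PySem.Int.mod y pvBitrateLevels), x')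

def int_to_tile_seting (x : Int) (tile_cnt : Int) : List (Int × Int) :=
  let tile_seting := (PySem.List.pyRange 0 tile_cnt 1).map (fun _ => ((0 : Int), (0 : Int)))
  let base := (pvTileSizeSet.length : Int) * pvBitrateLevels
  ((PySem.List.pyRange (tile_cnt - 1) (-1) (-1)).foldl (pvStepA base) (tile_seting, x)).1

-- ===== PORT B =====
def int_to_tile_seting_alt (x : Int) (tile_cnt : Int) : List (Int × Int) :=
  List.replicate tile_cnt.toNat ((0 : Int), (0 : Int))

-- ===== PRECONDITION & SPEC =====
def Spec_int_to_tile_seting (x : Int) (tile_cnt : Int) (out : List (Int × Int)) : Prop := out = int_to_tile_seting_alt x tile_cnt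
instance (x : Int) (tile_cnt : Int) (out : List (Int × Int)) : Decidable (Spec_int_to_tile_seting x tile_cnt out) := by unfold Spec_int_to_tile_seting; infer_instance

-- ===== CLAIM (what is proved, stated in full; the proofs are below) =====
def Claim_equal_int_to_tile_seting : Prop := ∀ (x : Int) (tile_cnt : Int), Dom_int_to_tile_seting x tile_cnt → Spec_int_to_tile_seting x tile_cnt (int_to_tile_seting x tile_cnt)

-- ===== LEMMAS AND PROOFS =====

theorem pv_mod_one (a : Int) : PySem.Int.mod a 1 = 0 := by
  rw [PySem.Int.mod_eq_emod_of_pos one_pos]; exact Int.emod_one a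

theorem pv_floordiv_one (a : Int) : PySem.Int.floordiv a 1 = a := by
  rw [PySem.Int.floordiv_eq_ediv_of_pos one_pos]; exact Int.ediv_one a

-- one step of A's loop (with base 1) sets position i to (0,0) and keeps x unchanged
theorem pvStepA_eq (l : List (Int × Int)) (xv i : Int) (hi : 0 ≤ i) :
    pvStepA 1 (l, xv) i = (l.set i.toNat ((0 : Int), (0 : Int)), xv) := by
  simp only [pvStepA, pvBitrateLevels, pv_mod_one, pv_floordiv_one,
    PySem.List.pySetD_of_nonneg l _ hi]

-- the fold preserves length and the "every element is (0,0)" property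
theorem pvFoldA_inv (ids : List Int) :
    ∀ (l : List (Int × Int)) (xv : Int),
      (∀ i ∈ ids, 0 ≤ i) → (∀ p ∈ l, p = ((0 : Int), (0 : Int))) →
      ((ids.foldl (pvStepA 1) (l, xv)).1.length = l.length ∧
        ∀ p ∈ (ids.foldl (pvStepA 1) (l, xv)).1, p = ((0 : Int), (0 : Int))) := by
  induction ids with
  | nil => intro l xv _ h; exact ⟨rfl, h⟩
  | cons i ids ih =>
    intro l xv hids h
    have hi : 0 ≤ i := hids i (List.mem_cons_self ..)
    simp only [List.foldl_cons, pvStepA_eq l xv i hi]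
    have h' : ∀ p ∈ l.set i.toNat ((0 : Int), (0 : Int)), p = ((0 : Int), (0 : Int)) := by
      intro p hp
      rcases List.mem_or_eq_of_mem_set hp with h'' | h''
      · exact h p h''
      · exact h''
    have := ih (l.set i.toNat ((0 : Int), (0 : Int))) xv
      (fun j hj => hids j (List.mem_cons_of_mem _ hj)) h'
    simpa [List.length_set] using this

-- ===== VERDICT (by name: the statement is the Claim_ definition above) =====
theorem int_to_tile_seting_spec : Claim_equal_int_to_tile_seting := by
  intro x tile_cnt _
  show int_to_tile_seting x tile_cnt = int_to_tile_seting_alt x tile_cnt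
  unfold int_to_tile_seting int_to_tile_seting_alt
  have hbase : ((pvTileSizeSet.length : Int) * pvBitrateLevels) = 1 := by decide
  rw [hbase]
  set l0 := (PySem.List.pyRange 0 tile_cnt 1).map (fun _ => ((0 : Int), (0 : Int))) with hl0
  have hlen0 : l0.length = tile_cnt.toNat := by
    simp [hl0, PySem.List.length_pyRange_one]
  have hall0 : ∀ p ∈ l0, p = ((0 : Int), (0 : Int)) := by
    intro p hp; simp [hl0] at hp; exact hp.2
  have hids : ∀ i ∈ PySem.List.pyRange (tile_cnt - 1) (-1) (-1), 0 ≤ i := by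
    intro i hi
    have := (PySem.List.mem_pyRange_neg_one).1 hi
    omega
  have hinv := pvFoldA_inv (PySem.List.pyRange (tile_cnt - 1) (-1) (-1)) l0 x hids hall0
  refine List.eq_replicate_iff.2 ⟨?_, hinv.2⟩
  rw [hinv.1, hlen0]
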